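-- pv_equiv track=rewrite | github.com/nydndr/spacePython | generator.py | getRange
-- ===== SOURCE A (Python) =====
-- fibonacciDays = [2,3,5,8,13,21,34,55,89,144,233,377]
--
-- def getRange(difference):
--     index = 0
--     for value in fibonacciDays:
--         if value < difference:
--             index+=1
--         else:
--             pass
--     return index
-- ===== SOURCE B (Python) =====
-- import bisect
--
-- fibonacciDays = [2,3,5,8,13,21,34,55,89,144,233,377]
--
-- def getRange(difference):
--     # binary search: insertion point of difference = count of elements strictly less
--     return bisect.bisect_left(fibonacciDays, difference)
-- ===== Notes on version B (the rewrite author's own statement) =====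
-- stated objective: idiomatic
-- what changed: Replaces the linear scan that counts fibonacci values below difference with a binary search (bisect_left) on the sorted constant list, whose insertion point equals that count.
import Mathlib
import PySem

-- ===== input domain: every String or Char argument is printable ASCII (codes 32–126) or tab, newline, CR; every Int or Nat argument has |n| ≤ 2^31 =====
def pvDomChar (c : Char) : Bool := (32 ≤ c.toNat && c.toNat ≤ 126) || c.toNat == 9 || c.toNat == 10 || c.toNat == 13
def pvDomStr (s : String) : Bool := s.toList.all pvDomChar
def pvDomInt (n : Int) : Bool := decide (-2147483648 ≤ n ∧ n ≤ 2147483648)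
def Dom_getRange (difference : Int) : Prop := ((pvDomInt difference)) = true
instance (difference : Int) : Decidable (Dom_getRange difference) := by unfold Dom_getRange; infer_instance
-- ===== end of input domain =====

-- B replaces A's linear counting scan with a binary search (bisect_left) on the sorted constant list; idiomatic, same result.


def fibonacciDays : List Int := [2,3,5,8,13,21,34,55,89,144,233,377]

-- ===== PORT A =====
-- for value in fibonacciDays: if value < difference: index += 1
def getRange (difference : Int) : Int :=
  fibonacciDays.foldl (fun index value => if value < difference then index + 1 else index) 0

-- ===== PORT B =====
-- bisect.bisect_left(fibonacciDays, difference): binary search returning the insertion point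
def bisectLeft (xs : List Int) (x : Int) (lo hi : Nat) : Nat :=
  if h : lo < hi then
    let mid := (lo + hi) / 2
    if xs.getD mid 0 < x then bisectLeft xs x (mid + 1) hi
    else bisectLeft xs x lo mid
  else lo
termination_by hi - lo
decreasing_by all_goals omega

def getRange_alt (difference : Int) : Int :=
  (bisectLeft fibonacciDays difference 0 fibonacciDays.length : Int)

-- ===== PRECONDITION & SPEC =====
def Spec_getRange (difference : Int) (out : Int) : Prop := out = getRange_alt difference
instance (difference : Int) (out : Int) : Decidable (Spec_getRange difference out) := by unfold Spec_getRange; infer_instance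

-- ===== CLAIM (what is proved, stated in full; the proofs are below) =====
def Claim_equal_getRange : Prop := ∀ (difference : Int), Dom_getRange difference → Spec_getRange difference (getRange difference)

-- ===== LEMMAS AND PROOFS =====

-- ===== VERDICT (by name: the statement is the Claim_ definition above) =====
set_option maxHeartbeats 1000000 in
theorem getRange_spec : Claim_equal_getRange := by
  intro d _
  unfold Spec_getRange getRange getRange_alt
  by_cases c0 : d ≤ 2
  · have n0 : ¬ (2:Int) < d := by omega
    have n1 : ¬ (3:Int) < d := by omega
    have n2 : ¬ (5:Int) < d := by omega
    have n3 : ¬ (8:Int) < d := by omega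
    have n4 : ¬ (13:Int) < d := by omega
    have n5 : ¬ (21:Int) < d := by omega
    have n6 : ¬ (34:Int) < d := by omega
    have n7 : ¬ (55:Int) < d := by omega
    have n8 : ¬ (89:Int) < d := by omega
    have n9 : ¬ (144:Int) < d := by omega
    have n10 : ¬ (233:Int) < d := by omega
    have n11 : ¬ (377:Int) < d := by omega
    simp [bisectLeft, fibonacciDays, n0, n1, n2, n3, n4, n5, n6, n7, n8, n9, n10, n11]
  by_cases c1 : d ≤ 3
  · have p0 : (2:Int) < d := by omega
    have n1 : ¬ (3:Int) < d := by omega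
    have n2 : ¬ (5:Int) < d := by omega
    have n3 : ¬ (8:Int) < d := by omega
    have n4 : ¬ (13:Int) < d := by omega
    have n5 : ¬ (21:Int) < d := by omega
    have n6 : ¬ (34:Int) < d := by omega
    have n7 : ¬ (55:Int) < d := by omega
    have n8 : ¬ (89:Int) < d := by omega
    have n9 : ¬ (144:Int) < d := by omega
    have n10 : ¬ (233:Int) < d := by omega
    have n11 : ¬ (377:Int) < d := by omega
    simp [bisectLeft, fibonacciDays, p0, n1, n2, n3, n4, n5, n6, n7, n8, n9, n10, n11]
  by_cases c2 : d ≤ 5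
  · have p0 : (2:Int) < d := by omega
    have p1 : (3:Int) < d := by omega
    have n2 : ¬ (5:Int) < d := by omega
    have n3 : ¬ (8:Int) < d := by omega
    have n4 : ¬ (13:Int) < d := by omega
    have n5 : ¬ (21:Int) < d := by omega
    have n6 : ¬ (34:Int) < d := by omega
    have n7 : ¬ (55:Int) < d := by omega
    have n8 : ¬ (89:Int) < d := by omega
    have n9 : ¬ (144:Int) < d := by omega
    have n10 : ¬ (233:Int) < d := by omega
    have n11 : ¬ (377:Int) < d := by omega
    simp [bisectLeft, fibonacciDays, p0, p1, n2, n3, n4, n5, n6, n7, n8, n9, n10, n11]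
  by_cases c3 : d ≤ 8
  · have p0 : (2:Int) < d := by omega
    have p1 : (3:Int) < d := by omega
    have p2 : (5:Int) < d := by omega
    have n3 : ¬ (8:Int) < d := by omega
    have n4 : ¬ (13:Int) < d := by omega
    have n5 : ¬ (21:Int) < d := by omega
    have n6 : ¬ (34:Int) < d := by omega
    have n7 : ¬ (55:Int) < d := by omega
    have n8 : ¬ (89:Int) < d := by omega
    have n9 : ¬ (144:Int) < d := by omega
    have n10 : ¬ (233:Int) < d := by omega
    have n11 : ¬ (377:Int) < d := by omega
    simp [bisectLeft, fibonacciDays, p0, p1, p2, n3, n4, n5, n6, n7, n8, n9, n10, n11]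
  by_cases c4 : d ≤ 13
  · have p0 : (2:Int) < d := by omega
    have p1 : (3:Int) < d := by omega
    have p2 : (5:Int) < d := by omega
    have p3 : (8:Int) < d := by omega
    have n4 : ¬ (13:Int) < d := by omega
    have n5 : ¬ (21:Int) < d := by omega
    have n6 : ¬ (34:Int) < d := by omega
    have n7 : ¬ (55:Int) < d := by omega
    have n8 : ¬ (89:Int) < d := by omega
    have n9 : ¬ (144:Int) < d := by omega
    have n10 : ¬ (233:Int) < d := by omega
    have n11 : ¬ (377:Int) < d := by omega
    simp [bisectLeft, fibonacciDays, p0, p1, p2, p3, n4, n5, n6, n7, n8, n9, n10, n11]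
  by_cases c5 : d ≤ 21
  · have p0 : (2:Int) < d := by omega
    have p1 : (3:Int) < d := by omega
    have p2 : (5:Int) < d := by omega
    have p3 : (8:Int) < d := by omega
    have p4 : (13:Int) < d := by omega
    have n5 : ¬ (21:Int) < d := by omega
    have n6 : ¬ (34:Int) < d := by omega
    have n7 : ¬ (55:Int) < d := by omega
    have n8 : ¬ (89:Int) < d := by omega
    have n9 : ¬ (144:Int) < d := by omega
    have n10 : ¬ (233:Int) < d := by omega
    have n11 : ¬ (377:Int) < d := by omega
    simp [bisectLeft, fibonacciDays, p0, p1, p2, p3, p4, n5, n6, n7, n8, n9, n10, n11]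
  by_cases c6 : d ≤ 34
  · have p0 : (2:Int) < d := by omega
    have p1 : (3:Int) < d := by omega
    have p2 : (5:Int) < d := by omega
    have p3 : (8:Int) < d := by omega
    have p4 : (13:Int) < d := by omega
    have p5 : (21:Int) < d := by omega
    have n6 : ¬ (34:Int) < d := by omega
    have n7 : ¬ (55:Int) < d := by omega
    have n8 : ¬ (89:Int) < d := by omega
    have n9 : ¬ (144:Int) < d := by omega
    have n10 : ¬ (233:Int) < d := by omega
    have n11 : ¬ (377:Int) < d := by omega
    simp [bisectLeft, fibonacciDays, p0, p1, p2, p3, p4, p5, n6, n7, n8, n9, n10, n11]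
  by_cases c7 : d ≤ 55
  · have p0 : (2:Int) < d := by omega
    have p1 : (3:Int) < d := by omega
    have p2 : (5:Int) < d := by omega
    have p3 : (8:Int) < d := by omega
    have p4 : (13:Int) < d := by omega
    have p5 : (21:Int) < d := by omega
    have p6 : (34:Int) < d := by omega
    have n7 : ¬ (55:Int) < d := by omega
    have n8 : ¬ (89:Int) < d := by omega
    have n9 : ¬ (144:Int) < d := by omega
    have n10 : ¬ (233:Int) < d := by omega
    have n11 : ¬ (377:Int) < d := by omega
    simp [bisectLeft, fibonacciDays, p0, p1, p2, p3, p4, p5, p6, n7, n8, n9, n10, n11]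
  by_cases c8 : d ≤ 89
  · have p0 : (2:Int) < d := by omega
    have p1 : (3:Int) < d := by omega
    have p2 : (5:Int) < d := by omega
    have p3 : (8:Int) < d := by omega
    have p4 : (13:Int) < d := by omega
    have p5 : (21:Int) < d := by omega
    have p6 : (34:Int) < d := by omega
    have p7 : (55:Int) < d := by omega
    have n8 : ¬ (89:Int) < d := by omega
    have n9 : ¬ (144:Int) < d := by omega
    have n10 : ¬ (233:Int) < d := by omega
    have n11 : ¬ (377:Int) < d := by omega
    simp [bisectLeft, fibonacciDays, p0, p1, p2, p3, p4, p5, p6, p7, n8, n9, n10, n11]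
  by_cases c9 : d ≤ 144
  · have p0 : (2:Int) < d := by omega
    have p1 : (3:Int) < d := by omega
    have p2 : (5:Int) < d := by omega
    have p3 : (8:Int) < d := by omega
    have p4 : (13:Int) < d := by omega
    have p5 : (21:Int) < d := by omega
    have p6 : (34:Int) < d := by omega
    have p7 : (55:Int) < d := by omega
    have p8 : (89:Int) < d := by omega
    have n9 : ¬ (144:Int) < d := by omega
    have n10 : ¬ (233:Int) < d := by omega
    have n11 : ¬ (377:Int) < d := by omega
    simp [bisectLeft, fibonacciDays, p0, p1, p2, p3, p4, p5, p6, p7, p8, n9, n10, n11]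
  by_cases c10 : d ≤ 233
  · have p0 : (2:Int) < d := by omega
    have p1 : (3:Int) < d := by omega
    have p2 : (5:Int) < d := by omega
    have p3 : (8:Int) < d := by omega
    have p4 : (13:Int) < d := by omega
    have p5 : (21:Int) < d := by omega
    have p6 : (34:Int) < d := by omega
    have p7 : (55:Int) < d := by omega
    have p8 : (89:Int) < d := by omega
    have p9 : (144:Int) < d := by omega
    have n10 : ¬ (233:Int) < d := by omega
    have n11 : ¬ (377:Int) < d := by omega
    simp [bisectLeft, fibonacciDays, p0, p1, p2, p3, p4, p5, p6, p7, p8, p9, n10, n11]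
  by_cases c11 : d ≤ 377
  · have p0 : (2:Int) < d := by omega
    have p1 : (3:Int) < d := by omega
    have p2 : (5:Int) < d := by omega
    have p3 : (8:Int) < d := by omega
    have p4 : (13:Int) < d := by omega
    have p5 : (21:Int) < d := by omega
    have p6 : (34:Int) < d := by omega
    have p7 : (55:Int) < d := by omega
    have p8 : (89:Int) < d := by omega
    have p9 : (144:Int) < d := by omega
    have p10 : (233:Int) < d := by omega
    have n11 : ¬ (377:Int) < d := by omega
    simp [bisectLeft, fibonacciDays, p0, p1, p2, p3, p4, p5, p6, p7, p8, p9, p10, n11]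
  have p0 : (2:Int) < d := by omega
  have p1 : (3:Int) < d := by omega
  have p2 : (5:Int) < d := by omega
  have p3 : (8:Int) < d := by omega
  have p4 : (13:Int) < d := by omega
  have p5 : (21:Int) < d := by omega
  have p6 : (34:Int) < d := by omega
  have p7 : (55:Int) < d := by omega
  have p8 : (89:Int) < d := by omega
  have p9 : (144:Int) < d := by omega
  have p10 : (233:Int) < d := by omega
  have p11 : (377:Int) < d := by omega
  simp [bisectLeft, fibonacciDays, p0, p1, p2, p3, p4, p5, p6, p7, p8, p9, p10, p11]
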